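-- pv_equiv track=rewrite | github.com/jellypedia/Automata | password.py | passwordValidator
-- ===== SOURCE A (Python) =====
-- table = [
--     [0, 1, 2],
--     [1, 1, 3],
--     [2, 3, 2],
--     [3, 3, 3]
-- ]
--
-- def specialChar(char) -> bool:
--     return not char.isalnum() and not char.isspace()
--
-- def passwordValidator(password):
--     state = 0
--     if len(password) < 8:
--         return False
--
--     for c in password:
--         if c.isalpha():
--             state = table[state][0]
--         elif c.isnumeric():
--             state = table[state][1]
--         elif specialChar(c):
--             state = table[state][2]
--
--         if state == 3:
--             return True
--     return False
-- ===== SOURCE B (Python) =====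
-- def specialChar(char) -> bool:
--     return not char.isalnum() and not char.isspace()
--
-- def passwordValidator(password):
--     return (len(password) >= 8
--             and any(c.isnumeric() for c in password)
--             and any(specialChar(c) for c in password))
-- ===== Notes on version B (the rewrite author's own statement) =====
-- stated objective: simpler
-- what changed: Replaced the DFA transition table and state loop by the condition it computes: length >= 8 and the password contains at least one numeric and one special character.
import Mathlib
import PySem

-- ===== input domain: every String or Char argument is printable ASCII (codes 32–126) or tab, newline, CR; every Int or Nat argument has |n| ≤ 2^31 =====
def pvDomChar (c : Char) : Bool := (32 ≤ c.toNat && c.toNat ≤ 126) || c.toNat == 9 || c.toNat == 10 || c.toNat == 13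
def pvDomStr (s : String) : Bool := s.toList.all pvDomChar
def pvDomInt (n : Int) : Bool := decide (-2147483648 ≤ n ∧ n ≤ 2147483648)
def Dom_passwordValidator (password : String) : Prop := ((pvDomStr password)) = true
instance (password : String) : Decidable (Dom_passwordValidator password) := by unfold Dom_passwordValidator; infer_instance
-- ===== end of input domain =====

-- B replaces A's DFA transition table and state loop by the condition the DFA decides:
-- length ≥ 8 and at least one numeric and one special character (objective: simpler).
-- Python's c.isnumeric() is ported as PySem.Chars.isdigit, exact on the ASCII domain Dom_.

-- ===== PORT A =====
def pvTable : List (List Nat) := [[0, 1, 2], [1, 1, 3], [2, 3, 2], [3, 3, 3]]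

def pvSpecialCharA (c : Char) : Bool := !PySem.Chars.isalnum c && !PySem.Chars.isspace c

def pvLoopA : List Char → Nat → Bool
  | [], _ => false
  | c :: rest, state =>
    let state' :=
      if PySem.Chars.isalpha c then (pvTable.getD state []).getD 0 0
      else if PySem.Chars.isdigit c then (pvTable.getD state []).getD 1 0
      else if pvSpecialCharA c then (pvTable.getD state []).getD 2 0
      else state
    if state' = 3 then true else pvLoopA rest state'

def passwordValidator (password : String) : Bool :=
  if PySem.Str.len password < 8 then false
  else pvLoopA password.toList 0

-- ===== PORT B =====
def pvSpecialCharB (c : Char) : Bool := !PySem.Chars.isalnum c && !PySem.Chars.isspace c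

def passwordValidator_alt (password : String) : Bool :=
  decide (8 ≤ PySem.Str.len password)
    && password.toList.any PySem.Chars.isdigit
    && password.toList.any pvSpecialCharB

-- ===== PRECONDITION & SPEC =====
def Spec_passwordValidator (password : String) (out : Bool) : Prop := out = passwordValidator_alt password
instance (password : String) (out : Bool) : Decidable (Spec_passwordValidator password out) := by unfold Spec_passwordValidator; infer_instance

-- ===== CLAIM (what is proved, stated in full; the proofs are below) =====
def Claim_equal_passwordValidator : Prop := ∀ (password : String), Dom_passwordValidator password → Spec_passwordValidator password (passwordValidator password)

-- ===== LEMMAS AND PROOFS =====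

lemma digit_not_alpha (c : Char) (h : PySem.Chars.isdigit c = true) :
    PySem.Chars.isalpha c = false := by
  simp only [PySem.Chars.isdigit, Bool.and_eq_true, decide_eq_true_eq] at h
  simp only [PySem.Chars.isalpha, PySem.Chars.isupper, PySem.Chars.islower,
    Bool.or_eq_false_iff, Bool.and_eq_false_iff, decide_eq_false_iff_not]
  simp only [Char.le_def, UInt32.le_iff_toNat_le,
    show '0'.val.toNat = 48 from rfl, show '9'.val.toNat = 57 from rfl,
    show 'A'.val.toNat = 65 from rfl, show 'Z'.val.toNat = 90 from rfl,
    show 'a'.val.toNat = 97 from rfl, show 'z'.val.toNat = 122 from rfl] at h ⊢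
  omega

lemma alpha_not_special (c : Char) (h : PySem.Chars.isalpha c = true) :
    pvSpecialCharA c = false := by
  simp [pvSpecialCharA, PySem.Chars.isalnum, h]

lemma digit_not_special (c : Char) (h : PySem.Chars.isdigit c = true) :
    pvSpecialCharA c = false := by
  simp [pvSpecialCharA, PySem.Chars.isalnum, h]

-- Invariant: state (if n then 1 else 0)+(if p then 2 else 0) means "numeric seen = n, special seen = p".
lemma loopA_spec (cs : List Char) (n p : Bool) (h : (n && p) = false) :
    pvLoopA cs ((if n then 1 else 0) + (if p then 2 else 0)) =
      ((n || cs.any PySem.Chars.isdigit) && (p || cs.any pvSpecialCharA)) := by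
  induction cs generalizing n p with
  | nil => cases n <;> cases p <;> simp_all [pvLoopA]
  | cons c cs ih =>
    by_cases ha : PySem.Chars.isalpha c = true
    · have hd := digit_not_alpha c
      have hdc : PySem.Chars.isdigit c = false := by
        by_contra hc; exact absurd (hd (by simpa using (Bool.of_not_eq_false hc))) (by simp [ha])
      have hs := alpha_not_special c ha
      cases n <;> cases p <;> simp_all [pvLoopA, pvTable]
    · by_cases hdc : PySem.Chars.isdigit c = true
      · have hs := digit_not_special c hdc
        cases n <;> cases p <;> simp_all [pvLoopA, pvTable]
      · by_cases hs : pvSpecialCharA c = true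
        · cases n <;> cases p <;> simp_all [pvLoopA, pvTable]
        · cases n <;> cases p <;> simp_all [pvLoopA]

-- ===== VERDICT (by name: the statement is the Claim_ definition above) =====
theorem passwordValidator_spec : Claim_equal_passwordValidator := by
  intro password _
  unfold Spec_passwordValidator passwordValidator passwordValidator_alt
  have hSp : pvSpecialCharB = pvSpecialCharA := rfl
  have hlen : PySem.Str.len password = (password.length : Int) := by
    simp [PySem.Str.len]
  have hmain : pvLoopA password.toList 0 =
      (password.toList.any PySem.Chars.isdigit && password.toList.any pvSpecialCharA) := by
    simpa using loopA_spec password.toList false false (by simp)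
  by_cases hl : password.length < 8
  · simp [hl, show ¬ ((8 : Int) ≤ (password.length : Int)) by exact_mod_cast by omega]
  · simp [hl, hSp, hmain, show (8 : Int) ≤ (password.length : Int) by exact_mod_cast by omega]
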